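-- pv_equiv track=rewrite | github.com/yht0827/coding-test | Eunleelee/2024-01/1월 22일/나머지가_1이_되는_수_찾기.py | solution
-- ===== SOURCE A (Python) =====
-- def solution(n):
--     answer = 0
--     num = 0
--     for i in range(1, n):
--         if n % i == 1 and num == 0:
--             answer = i
--             num = 1
--     return answer
-- ===== SOURCE B (Python) =====
-- def solution(n):
--     if n <= 2:
--         return 0
--     m = n - 1
--     d = 2
--     while d * d <= m:
--         if m % d == 0:
--             return d
--         d += 1
--     return m
-- ===== Notes on version B (the rewrite author's own statement) =====
-- stated objective: faster
-- what changed: Instead of scanning every candidate below n for remainder one, B finds the smallest nontrivial divisor of n minus one by trial division up to its square root, falling back to n minus one itself when none is found.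
import Mathlib
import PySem

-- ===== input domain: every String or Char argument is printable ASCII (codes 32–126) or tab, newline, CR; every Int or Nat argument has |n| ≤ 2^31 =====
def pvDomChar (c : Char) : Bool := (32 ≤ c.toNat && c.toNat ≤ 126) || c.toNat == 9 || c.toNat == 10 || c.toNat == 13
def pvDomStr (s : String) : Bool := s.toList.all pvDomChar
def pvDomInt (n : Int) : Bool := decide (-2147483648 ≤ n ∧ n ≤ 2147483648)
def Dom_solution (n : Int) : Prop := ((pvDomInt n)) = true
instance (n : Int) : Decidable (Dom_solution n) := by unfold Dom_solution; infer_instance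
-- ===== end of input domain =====

-- B replaces A's linear scan for the least i with n % i == 1 by trial division
-- for the least divisor > 1 of n-1 up to its square root (objective: faster).


-- ===== PORT A =====
-- literal port: fold over range(1, n) carrying (answer, num)
def solution (n : Int) : Int :=
  ((PySem.List.pyRange 1 n 1).foldl
    (fun (st : Int × Int) i => if PySem.Int.mod n i = 1 ∧ st.2 = 0 then (i, 1) else st)
    (0, 0)).1

-- ===== PORT B =====
-- the while-loop of Source B: scan d = 2, 3, … while d*d ≤ m for a divisor of m
def solutionAltLoop (m d : Int) : Int :=
  if _h : d * d ≤ m then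
    (if PySem.Int.mod m d = 0 then d else solutionAltLoop m (d + 1))
  else m
termination_by (m + 1 - d).toNat
decreasing_by
  have hdm : d ≤ m := by
    rcases Int.lt_or_le 0 d with h0 | h0
    · nlinarith
    · nlinarith [mul_self_nonneg d]
  omega

def solution_alt (n : Int) : Int :=
  if n ≤ 2 then 0 else solutionAltLoop (n - 1) 2

-- ===== PRECONDITION & SPEC =====
def Spec_solution (n : Int) (out : Int) : Prop := out = solution_alt n
instance (n : Int) (out : Int) : Decidable (Spec_solution n out) := by unfold Spec_solution; infer_instance

-- ===== CLAIM (what is proved, stated in full; the proofs are below) =====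
def Claim_equal_solution : Prop := ∀ (n : Int), Dom_solution n → Spec_solution n (solution n)

-- ===== LEMMAS AND PROOFS =====

-- first i in l with n % i == 1, else 0 (characterisation of A's fold)
def firstHit (n : Int) : List Int → Int
  | [] => 0
  | i :: t => if PySem.Int.mod n i = 1 then i else firstHit n t

-- once num = 1 the fold never changes its state
theorem foldA_stick (n a : Int) (l : List Int) :
    l.foldl (fun (st : Int × Int) i => if PySem.Int.mod n i = 1 ∧ st.2 = 0 then (i, 1) else st)
      (a, 1) = (a, 1) := by
  induction l with
  | nil => rfl
  | cons x t ih => simp [List.foldl, ih]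

theorem foldA_eq_firstHit (n : Int) (l : List Int) :
    (l.foldl (fun (st : Int × Int) i => if PySem.Int.mod n i = 1 ∧ st.2 = 0 then (i, 1) else st)
      (0, 0)).1 = firstHit n l := by
  induction l with
  | nil => rfl
  | cons x t ih =>
    by_cases hx : PySem.Int.mod n x = 1
    · simp [List.foldl, firstHit, hx, foldA_stick]
    · simp [List.foldl, firstHit, hx, ih]

-- n % i == 1 is divisibility of n-1, for i ≥ 2
theorem hit_iff_dvd (n i : Int) (hi : 2 ≤ i) :
    PySem.Int.mod n i = 1 ↔ i ∣ (n - 1) := by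
  rw [PySem.Int.mod_eq_emod_of_pos (by omega)]
  constructor
  · intro h
    have hdef := Int.emod_def n i
    exact ⟨n / i, by omega⟩
  · rintro ⟨q, hq⟩
    have hn : n = 1 + i * q := by omega
    rw [hn, Int.add_mul_emod_self_left]
    exact Int.emod_eq_of_lt (by norm_num) (by omega)

-- Int ∣ on nonnegative values transfers to Nat ∣ of the toNats
theorem dvd_toNat (i m : Int) (hi : 0 ≤ i) (hm : 0 ≤ m) :
    i ∣ m ↔ i.toNat ∣ m.toNat := by
  rw [← Int.natCast_dvd_natCast, Int.toNat_of_nonneg hi, Int.toNat_of_nonneg hm]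

-- if the least prime factor of m is a proper divisor, its square is at most m
theorem minFac_sq_le (M : Nat) (hM : 2 ≤ M) (hlt : M.minFac < M) :
    M.minFac * M.minFac ≤ M := by
  obtain ⟨e, he⟩ := Nat.minFac_dvd M
  have hp2 : 2 ≤ M.minFac := (Nat.minFac_prime (by omega)).two_le
  have he2 : 2 ≤ e := by
    rcases Nat.lt_or_ge e 2 with h | h
    · interval_cases e <;> omega
    · exact h
  have hpe : M.minFac ≤ e :=
    Nat.minFac_le_of_dvd he2 ⟨M.minFac, by rw [Nat.mul_comm e M.minFac]; exact he⟩
  calc M.minFac * M.minFac ≤ M.minFac * e := Nat.mul_le_mul_left _ hpe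
    _ = M := he.symm

-- A's scan from k returns the least prime factor p of n-1, for 2 ≤ k ≤ p
theorem scanA (n : Int) (hn : 3 ≤ n) :
    ∀ (j : Nat) (k : Int), k = ((n - 1).toNat.minFac : Int) - j → 2 ≤ k →
      firstHit n (PySem.List.pyRange k n 1) = ((n - 1).toNat.minFac : Int) := by
  have hpd : (n - 1).toNat.minFac ∣ (n - 1).toNat := Nat.minFac_dvd _
  have hpM : (n - 1).toNat.minFac ≤ (n - 1).toNat := Nat.minFac_le (by omega)
  intro j
  induction j with
  | zero =>
    intro k hk _
    have hkp : k = ((n - 1).toNat.minFac : Int) := by omega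
    have hkn : k < n := by omega
    rw [PySem.List.pyRange_one_cons hkn]
    have hhit : PySem.Int.mod n k = 1 := by
      rw [hit_iff_dvd n k (by omega)]
      rw [dvd_toNat k (n - 1) (by omega) (by omega)]
      have : k.toNat = (n - 1).toNat.minFac := by omega
      rw [this]; exact hpd
    simp only [firstHit]
    rw [if_pos hhit]; exact hkp
  | succ j ih =>
    intro k hk hk2
    have hkp : k < ((n - 1).toNat.minFac : Int) := by omega
    have hkn : k < n := by omega
    rw [PySem.List.pyRange_one_cons hkn]
    have hmiss : ¬ PySem.Int.mod n k = 1 := by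
      intro h
      rw [hit_iff_dvd n k (by omega), dvd_toNat k (n - 1) (by omega) (by omega)] at h
      have := Nat.minFac_le_of_dvd (by omega) h
      omega
    simp only [firstHit]
    rw [if_neg hmiss]
    exact ih (k + 1) (by omega) (by omega)

-- B's trial division from d returns the same least prime factor, for 2 ≤ d ≤ p
theorem scanB (n : Int) (hn : 3 ≤ n) :
    ∀ (j : Nat) (d : Int), d = ((n - 1).toNat.minFac : Int) - j → 2 ≤ d →
      solutionAltLoop (n - 1) d = ((n - 1).toNat.minFac : Int) := by
  have hpd : (n - 1).toNat.minFac ∣ (n - 1).toNat := Nat.minFac_dvd _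
  have hpM : (n - 1).toNat.minFac ≤ (n - 1).toNat := Nat.minFac_le (by omega)
  intro j
  induction j with
  | zero =>
    intro d hd _
    have hdp : d = ((n - 1).toNat.minFac : Int) := by omega
    rw [solutionAltLoop]
    by_cases hsq : d * d ≤ n - 1
    · rw [dif_pos hsq]
      have hdvd : PySem.Int.mod (n - 1) d = 0 := by
        rw [PySem.Int.mod_eq_zero_iff_dvd, dvd_toNat d (n - 1) (by omega) (by omega)]
        have : d.toNat = (n - 1).toNat.minFac := by omega
        rw [this]; exact hpd
      rw [if_pos hdvd]; exact hdp
    · rw [dif_neg hsq]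
      -- no divisor reaches the root: n-1 is its own least prime factor
      rcases Nat.lt_or_ge (n - 1).toNat.minFac (n - 1).toNat with hlt | hge
      · exfalso
        have h1 : (((n - 1).toNat.minFac : Int)) * (((n - 1).toNat.minFac : Int)) ≤ ((n - 1).toNat : Int) :=
          by exact_mod_cast minFac_sq_le (n - 1).toNat (by omega) hlt
        rw [hdp] at hsq
        have h2 : ((n - 1).toNat : Int) = n - 1 := by omega
        linarith
      · omega
  | succ j ih =>
    intro d hd hd2
    have hdp : d < ((n - 1).toNat.minFac : Int) := by omega
    rw [solutionAltLoop]
    by_cases hsq : d * d ≤ n - 1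
    · rw [dif_pos hsq]
      have hmiss : ¬ PySem.Int.mod (n - 1) d = 0 := by
        intro h
        rw [PySem.Int.mod_eq_zero_iff_dvd, dvd_toNat d (n - 1) (by omega) (by omega)] at h
        have := Nat.minFac_le_of_dvd (by omega) h
        omega
      rw [if_neg hmiss]
      exact ih (d + 1) (by omega) (by omega)
    · rw [dif_neg hsq]
      rcases Nat.lt_or_ge (n - 1).toNat.minFac (n - 1).toNat with hlt | hge
      · exfalso
        -- d < p and p² ≤ m force d·d ≤ m, against hsq
        have h1 : (((n - 1).toNat.minFac : Int)) * (((n - 1).toNat.minFac : Int)) ≤ ((n - 1).toNat : Int) :=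
          by exact_mod_cast minFac_sq_le (n - 1).toNat (by omega) hlt
        have h2 : ((n - 1).toNat : Int) = n - 1 := by omega
        nlinarith
      · omega

-- ===== VERDICT (by name: the statement is the Claim_ definition above) =====
theorem solution_spec : Claim_equal_solution := by
  intro n _
  unfold Spec_solution solution solution_alt
  rw [foldA_eq_firstHit]
  by_cases hn : n ≤ 2
  · rw [if_pos hn]
    rcases Int.lt_or_le 1 n with h1 | h1
    · have hn2 : n = 2 := by omega
      subst hn2
      decide
    · rw [PySem.List.pyRange_one_eq_nil h1]; rfl
  · rw [if_neg hn]
    have hn3 : 3 ≤ n := by omega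
    have hp2 : 2 ≤ (n - 1).toNat.minFac := (Nat.minFac_prime (by omega : (n-1).toNat ≠ 1)).two_le
    have h1n : (1 : Int) < n := by omega
    rw [PySem.List.pyRange_one_cons h1n]
    have hmiss1 : ¬ PySem.Int.mod n 1 = 1 := by
      rw [PySem.Int.mod_eq_emod_of_pos (by omega)]
      simp
    simp only [firstHit]
    rw [if_neg hmiss1, show (1:Int) + 1 = 2 from rfl]
    rw [scanA n hn3 ((n - 1).toNat.minFac - 2) 2 (by omega) (by omega)]
    rw [scanB n hn3 ((n - 1).toNat.minFac - 2) 2 (by omega) (by omega)]
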